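-- pv_equiv track=rewrite | github.com/reducto-sigcomm-2020/reducto | reducto/evaluator/metrics.py | interp_frame_ids
-- ===== SOURCE A (Python) =====
-- def interp_frame_ids(frame_ids, num_frames):
--     full_ids, interped_ids = list(range(1, num_frames + 1)), []
--     full_index, interp_index, last_number_seen = 0, 0, 0
--     while full_index != len(full_ids) and interp_index != len(frame_ids):
--         if full_ids[full_index] == frame_ids[interp_index]:
--             last_number_seen = frame_ids[interp_index]
--             interped_ids.append(last_number_seen)
--             full_index += 1
--             interp_index += 1
--         else:
--             interped_ids.append(last_number_seen)
--             full_index += 1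
--     while full_index != len(full_ids):
--         interped_ids.append(last_number_seen)
--         full_index += 1
--     return interped_ids
-- ===== SOURCE B (Python) =====
-- def interp_frame_ids(frame_ids, num_frames):
--     result = []
--     last = 0
--     for v in frame_ids:
--         if len(result) < v <= num_frames:
--             result.extend([last] * (v - 1 - len(result)))
--             result.append(v)
--             last = v
--         else:
--             break
--     result.extend([last] * (num_frames - len(result)))
--     return result
-- ===== Notes on version B (the rewrite author's own statement) =====
-- stated objective: faster
-- what changed: Replaces the per-frame scan over range(1, num_frames+1) with a run-fill over the sparse frame_ids: each matching id fills the gap before it in one extend, and the first non-advancing id breaks and pads the rest.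
import Mathlib
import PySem

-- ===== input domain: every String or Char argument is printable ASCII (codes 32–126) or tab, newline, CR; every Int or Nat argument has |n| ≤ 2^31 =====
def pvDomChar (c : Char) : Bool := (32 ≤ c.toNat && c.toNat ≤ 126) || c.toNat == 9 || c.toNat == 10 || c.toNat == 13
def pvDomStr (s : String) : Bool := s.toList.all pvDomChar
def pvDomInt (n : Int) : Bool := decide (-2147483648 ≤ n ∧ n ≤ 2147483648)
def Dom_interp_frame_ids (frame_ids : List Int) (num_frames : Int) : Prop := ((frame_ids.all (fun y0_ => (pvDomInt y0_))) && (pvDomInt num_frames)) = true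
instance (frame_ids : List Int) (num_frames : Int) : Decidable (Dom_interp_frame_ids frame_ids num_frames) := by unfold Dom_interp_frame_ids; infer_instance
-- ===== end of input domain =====

-- B replaces A's per-frame scan over range(1, num_frames+1) by a run-fill over the
-- frame_ids themselves (bulk fills between matches, break on the first non-advancing id).

-- ===== PORT A =====
-- A's while loop: the full-id cursor is modelled by consuming the pyRange list;
-- the frozen interp cursor keeps the (v :: vs) list unchanged in the else branch.
def interpA_loop : List Int → List Int → Int → List Int
  | [], _, _ => []
  | _ :: fs, [], last => last :: interpA_loop fs [] last
  | f :: fs, v :: vs, last =>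
    if f = v then v :: interpA_loop fs vs v
    else last :: interpA_loop fs (v :: vs) last

def interp_frame_ids (frame_ids : List Int) (num_frames : Int) : List Int :=
  interpA_loop (PySem.List.pyRange 1 (num_frames + 1) 1) frame_ids 0

-- ===== PORT B =====
-- Source B's for loop over frame_ids with result/last accumulator; `[x]*k` with k ≤ 0 is
-- the empty list in Python, matched exactly by `.toNat` clamping in List.replicate.
def interpB_loop : List Int → List Int → Int → Int → List Int
  | [], result, last, num_frames =>
      result ++ List.replicate (num_frames - result.length).toNat last
  | v :: vs, result, last, num_frames =>
    if (result.length : Int) < v ∧ v ≤ num_frames then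
      interpB_loop vs (result ++ List.replicate (v - 1 - result.length).toNat last ++ [v]) v num_frames
    else
      result ++ List.replicate (num_frames - result.length).toNat last

def interp_frame_ids_alt (frame_ids : List Int) (num_frames : Int) : List Int :=
  interpB_loop frame_ids [] 0 num_frames

-- ===== PRECONDITION & SPEC =====
def Spec_interp_frame_ids (frame_ids : List Int) (num_frames : Int) (out : List Int) : Prop := out = interp_frame_ids_alt frame_ids num_frames
instance (frame_ids : List Int) (num_frames : Int) (out : List Int) : Decidable (Spec_interp_frame_ids frame_ids num_frames out) := by unfold Spec_interp_frame_ids; infer_instance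

-- ===== CLAIM (what is proved, stated in full; the proofs are below) =====
def Claim_equal_interp_frame_ids : Prop := ∀ (frame_ids : List Int) (num_frames : Int), Dom_interp_frame_ids frame_ids num_frames → Spec_interp_frame_ids frame_ids num_frames (interp_frame_ids frame_ids num_frames)

-- ===== LEMMAS AND PROOFS =====

-- The common functional core: what B appends after a result of length L.
def Btail : List Int → Int → Int → Int → List Int
  | [], L, last, nf => List.replicate (nf - L).toNat last
  | v :: vs, L, last, nf =>
    if L < v ∧ v ≤ nf then
      List.replicate (v - 1 - L).toNat last ++ v :: Btail vs v v nf
    else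
      List.replicate (nf - L).toNat last

theorem Btail_nil (L last nf : Int) : Btail [] L last nf = List.replicate (nf - L).toNat last := rfl

theorem Btail_cons (v : Int) (vs : List Int) (L last nf : Int) :
    Btail (v :: vs) L last nf =
      if L < v ∧ v ≤ nf then List.replicate (v - 1 - L).toNat last ++ v :: Btail vs v v nf
      else List.replicate (nf - L).toNat last := rfl

theorem interpA_cons_cons (f : Int) (fs : List Int) (v : Int) (vs : List Int) (last : Int) :
    interpA_loop (f :: fs) (v :: vs) last =
      if f = v then v :: interpA_loop fs vs v else last :: interpA_loop fs (v :: vs) last := rfl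

theorem interpA_pad (nf last : Int) :
    ∀ (n : Nat) (c : Int), (nf + 1 - c).toNat = n →
      interpA_loop (PySem.List.pyRange c (nf + 1) 1) [] last = List.replicate n last := by
  intro n
  induction n with
  | zero =>
    intro c h
    rw [PySem.List.pyRange_one_eq_nil (by omega)]
    simp [interpA_loop]
  | succ k ih =>
    intro c h
    rw [PySem.List.pyRange_one_cons (by omega)]
    simp only [interpA_loop, List.replicate_succ]
    rw [ih (c + 1) (by omega)]

theorem interpA_frozen (nf last v : Int) (vs : List Int) :
    ∀ (n : Nat) (c : Int), (nf + 1 - c).toNat = n → (v < c ∨ nf < v) →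
      interpA_loop (PySem.List.pyRange c (nf + 1) 1) (v :: vs) last = List.replicate n last := by
  intro n
  induction n with
  | zero =>
    intro c h _
    rw [PySem.List.pyRange_one_eq_nil (by omega)]
    simp [interpA_loop]
  | succ k ih =>
    intro c h hv
    rw [PySem.List.pyRange_one_cons (by omega)]
    simp only [interpA_loop, List.replicate_succ]
    rw [if_neg (by omega), ih (c + 1) (by omega) (by omega)]

theorem interpA_eq_Btail (nf : Int) :
    ∀ (n : Nat) (c : Int) (vs : List Int) (last : Int), (nf + 1 - c).toNat = n →
      interpA_loop (PySem.List.pyRange c (nf + 1) 1) vs last = Btail vs (c - 1) last nf := by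
  intro n
  induction n with
  | zero =>
    intro c vs last h
    rw [PySem.List.pyRange_one_eq_nil (by omega)]
    cases vs with
    | nil =>
      have h0 : (nf - (c - 1)).toNat = 0 := by omega
      simp [interpA_loop, Btail_nil, h0]
    | cons v rest =>
      rw [Btail_cons, if_neg (by omega)]
      have h0 : (nf - (c - 1)).toNat = 0 := by omega
      simp [interpA_loop, h0]
  | succ k ih =>
    intro c vs last h
    rw [PySem.List.pyRange_one_cons (by omega)]
    cases vs with
    | nil =>
      simp only [interpA_loop, Btail_nil]
      rw [interpA_pad nf last k (c + 1) (by omega)]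
      have h1 : (nf - (c - 1)).toNat = k + 1 := by omega
      rw [h1, List.replicate_succ]
    | cons v rest =>
      rw [interpA_cons_cons, Btail_cons]
      by_cases hv : c = v
      · rw [if_pos hv, if_pos (by omega)]
        have hrec := ih (c + 1) rest v (by omega)
        have h1 : c + 1 - 1 = v := by omega
        rw [h1] at hrec
        rw [hrec]
        have h0 : (v - 1 - (c - 1)).toNat = 0 := by omega
        rw [h0]
        simp
      · by_cases hfr : v < c ∨ nf < v
        · rw [if_neg hv, if_neg (by omega)]
          rw [interpA_frozen nf last v rest k (c + 1) (by omega) (by omega)]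
          have h1 : (nf - (c - 1)).toNat = k + 1 := by omega
          rw [h1, List.replicate_succ]
        · -- c < v ≤ nf : A pads one frame and keeps scanning
          rw [if_neg hv, if_pos (by omega)]
          rw [ih (c + 1) (v :: rest) last (by omega), Btail_cons, if_pos (by omega)]
          have h1 : (v - 1 - (c - 1)).toNat = (v - 1 - (c + 1 - 1)).toNat + 1 := by omega
          rw [h1, List.replicate_succ]
          simp

theorem interpB_eq_Btail (nf : Int) :
    ∀ (vs : List Int) (res : List Int) (last : Int),
      interpB_loop vs res last nf = res ++ Btail vs (res.length : Int) last nf := by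
  intro vs
  induction vs with
  | nil => intro res last; simp [interpB_loop, Btail]
  | cons v rest ih =>
    intro res last
    simp only [interpB_loop, Btail]
    by_cases h : (res.length : Int) < v ∧ v ≤ nf
    · rw [if_pos h, if_pos h, ih]
      have hlen : (((res ++ List.replicate (v - 1 - (res.length : Int)).toNat last ++ [v]).length : Nat) : Int) = v := by
        simp
        omega
      rw [hlen]
      simp
    · rw [if_neg h, if_neg h]

-- ===== VERDICT (by name: the statement is the Claim_ definition above) =====
theorem interp_frame_ids_spec : Claim_equal_interp_frame_ids := by
  intro frame_ids num_frames _
  unfold Spec_interp_frame_ids interp_frame_ids interp_frame_ids_alt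
  rw [interpA_eq_Btail num_frames (num_frames + 1 - 1).toNat 1 frame_ids 0 rfl,
      interpB_eq_Btail num_frames frame_ids [] 0]
  simp
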